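-- pv_equiv track=rewrite | github.com/yaochangfei/stars_new | actions/backoffice/b_export_learning_situation.py | convert
-- ===== SOURCE A (Python) =====
-- def convert(num: int = 0):
--     _map = {i: chr(ord('A') + i) for i in range(26)}
--     if num == 0:
--         return _map[num]
--
--     ret_list = list()
--     while True:
--         if num == 0:
--             break
--         num, y = divmod(num, 26)
--         ret_list.append(y)
--
--     ret_list.reverse()
--     temp_list = [r - 1 for r in ret_list[0:-1]]
--     temp_list.append(ret_list[-1])
--     return ''.join(map(lambda x: _map[x], temp_list))
-- ===== SOURCE B (Python) =====
-- def convert(num: int = 0):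
--     # num is the 0-based index of an Excel-style column name: build it in one pass.
--     n = num + 1
--     res = ''
--     while n > 0:
--         n, r = divmod(n - 1, 26)
--         res = chr(ord('A') + r) + res
--     return res
-- ===== Notes on version B (the rewrite author's own statement) =====
-- stated objective: simpler
-- what changed: A builds a 26-entry dict, collects base-26 digits in a list, reverses it and patches all but the last digit by -1 before joining; B recognises the value as the Excel column name of num+1 and builds the string in one while-loop with n, r = divmod(n-1, 26), prepending chr(ord('A')+r).
-- crash fix: A raises KeyError whenever some base-26 digit of num other than the least-significant one is 0 (e.g. 676..701), because the -1 patch produces key -1; B returns the proper Excel-style name there (e.g. 'ZA' for 676). A also loops forever on negative num; Pre_ excludes both regions. — e.g. on convert(676): A raises KeyError, B returns "ZA"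
import Mathlib
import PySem

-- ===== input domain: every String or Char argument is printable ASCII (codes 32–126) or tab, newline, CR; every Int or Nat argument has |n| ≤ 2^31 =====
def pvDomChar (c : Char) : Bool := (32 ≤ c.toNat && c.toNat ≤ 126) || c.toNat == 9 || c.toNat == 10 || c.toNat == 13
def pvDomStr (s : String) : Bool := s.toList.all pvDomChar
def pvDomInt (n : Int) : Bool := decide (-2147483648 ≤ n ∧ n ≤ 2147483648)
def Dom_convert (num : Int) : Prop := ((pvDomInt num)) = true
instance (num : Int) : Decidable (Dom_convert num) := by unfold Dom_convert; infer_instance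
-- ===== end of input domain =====

-- B replaces A's dict + digit-list + reverse-and-subtract-1 phases by one divmod(n-1,26) loop
-- building the Excel-style column name of num+1 directly (objective: simpler).

-- ===== PORT A =====
-- _map = {i: chr(ord('A') + i) for i in range(26)}
def convertMap : PySem.Dict Int Char :=
  (PySem.List.pyRange 0 26 1).foldl
    (fun d i => d.insert i (Char.ofNat ((65 + i).toNat))) PySem.Dict.empty

-- the `while True` loop; the fuel only makes the recursion total (one step per iteration):
-- num.toNat + 1 iterations always suffice for num ≥ 0, and Pre_ excludes num < 0 (Python diverges there)
def convertLoopA : Nat → Int → List Int → List Int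
  | 0, _, acc => acc
  | f + 1, num, acc =>
      if num = 0 then acc
      else convertLoopA f (PySem.Int.floordiv num 26) (acc ++ [PySem.Int.mod num 26])

def convert (num : Int) : String :=
  if num = 0 then
    -- _map[num]: key 0 is present, so the lookup is exact
    String.mk [(convertMap.get? num).getD '?']
  else
    let retList := convertLoopA (num.toNat + 1) num []
    let rev := retList.reverse
    let tempList := (PySem.List.slice rev (some 0) (some (-1))).map (fun r => r - 1) ++
      -- ret_list[-1]: the list is nonempty whenever the loop terminated with num ≠ 0, so exact on Pre_
      [(PySem.List.pyGet? rev (-1)).getD 0]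
    -- _map[x]: Pre_ excludes exactly the inputs on which this raises KeyError (key -1)
    String.mk (tempList.map (fun x => (convertMap.get? x).getD '?'))

-- ===== PORT B =====
-- while n > 0: n, r = divmod(n - 1, 26); res = chr(ord('A') + r) + res
def convertAltLoop (n : Int) (res : List Char) : List Char :=
  if h : 0 < n then
    convertAltLoop (PySem.Int.floordiv (n - 1) 26)
      (Char.ofNat ((65 + PySem.Int.mod (n - 1) 26).toNat) :: res)
  else res
termination_by n.toNat
decreasing_by
  have h26 : (0:Int) < 26 := by norm_num
  have : PySem.Int.floordiv (n - 1) 26 = (n - 1) / 26 := PySem.Int.floordiv_eq_ediv_of_pos h26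
  have h1 : (n - 1) / 26 ≤ n - 1 := Int.ediv_le_self _ (by omega)
  have h2 : 0 ≤ (n - 1) / 26 := Int.ediv_nonneg (by omega) (by omega)
  omega

def convert_alt (num : Int) : String := String.mk (convertAltLoop (num + 1) [])

-- ===== PRECONDITION & SPEC =====
-- Pre_ excludes exactly the inputs where the Python A does not return: num < 0 (the while-loop never
-- terminates) and num ≥ 0 having a zero base-26 digit above the least-significant one (KeyError -1).
def Pre_convert (num : Int) : Prop :=
  0 ≤ num ∧ ∀ k ∈ Finset.Icc 1 7, num / (26:Int) ^ k = 0 ∨ num / (26:Int) ^ k % 26 ≠ 0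
instance (num : Int) : Decidable (Pre_convert num) := by unfold Pre_convert; infer_instance

def pvWitness_convert : Int := 702

-- A raises KeyError on num ≥ 0 whose base-26 expansion has a zero digit above the least-significant
-- one (e.g. 676); B returns the proper Excel-style column name there ('ZA' for 676).
def Raises_convert (num : Int) : Prop :=
  0 ≤ num ∧ ∃ k ∈ Finset.Icc 1 7, num / (26:Int) ^ k ≠ 0 ∧ num / (26:Int) ^ k % 26 = 0
instance (num : Int) : Decidable (Raises_convert num) := by unfold Raises_convert; infer_instance

def pvRaiseWitness_convert : Int := 676
def pvRaiseWitnessOut_convert : String := "ZA"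

def Spec_convert (num : Int) (out : String) : Prop := out = convert_alt num
instance (num : Int) (out : String) : Decidable (Spec_convert num out) := by unfold Spec_convert; infer_instance

-- ===== CLAIM (what is proved, stated in full; the proofs are below) =====
def Claim_equal_convert : Prop := ∀ (num : Int), Dom_convert num → Pre_convert num → Spec_convert num (convert num)
def Claim_raises_convert : Prop := (∀ (num : Int), Dom_convert num → Raises_convert num → ¬ Pre_convert num) ∧ (Dom_convert (pvRaiseWitness_convert) ∧ Raises_convert (pvRaiseWitness_convert) ∧ convert_alt (pvRaiseWitness_convert) = pvRaiseWitnessOut_convert)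

-- ===== LEMMAS AND PROOFS =====

-- base-26 digits, least-significant first (proof-side characterisation of A's loop)
def digitsN (n : Nat) : List Nat :=
  if h : n = 0 then [] else n % 26 :: digitsN (n / 26)
termination_by n
decreasing_by exact Nat.div_lt_self (Nat.pos_of_ne_zero h) (by omega)

-- Excel column chars of n (proof-side characterisation of B's loop)
def excelN (n : Nat) : List Char :=
  if h : n = 0 then [] else excelN ((n - 1) / 26) ++ [Char.ofNat (65 + (n - 1) % 26)]
termination_by n
decreasing_by have := Nat.div_le_self (n - 1) 26; omega

theorem digitsN_zero : digitsN 0 = [] := by unfold digitsN; simp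

theorem digitsN_pos {m : Nat} (h : m ≠ 0) : digitsN m = m % 26 :: digitsN (m / 26) := by
  rw [digitsN]; simp [h]

theorem excelN_zero : excelN 0 = [] := by unfold excelN; simp

theorem excelN_pos {m : Nat} (h : m ≠ 0) :
    excelN m = excelN ((m - 1) / 26) ++ [Char.ofNat (65 + (m - 1) % 26)] := by
  rw [excelN]; simp [h]

theorem convertLoopA_spec : ∀ (f m : Nat) (acc : List Int), m < f →
    convertLoopA f (m : Int) acc = acc ++ (digitsN m).map (fun (d : Nat) => (d : Int)) := by
  intro f
  induction f with
  | zero => intro m acc h; omega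
  | succ f ih =>
    intro m acc h
    by_cases hm : m = 0
    · subst hm; simp [convertLoopA, digitsN_zero]
    · have hne : (m : Int) ≠ 0 := by exact_mod_cast hm
      have hdiv : PySem.Int.floordiv (m : Int) 26 = ((m / 26 : Nat) : Int) := by
        exact_mod_cast PySem.Int.floordiv_natCast m 26
      have hmod : PySem.Int.mod (m : Int) 26 = ((m % 26 : Nat) : Int) := by
        exact_mod_cast PySem.Int.mod_natCast m 26
      have hlt : m / 26 < f := by
        have := Nat.div_lt_self (Nat.pos_of_ne_zero hm) (by omega : 1 < 26)
        omega
      simp only [convertLoopA, hne, if_false, hdiv, hmod, ih _ _ hlt, digitsN_pos hm]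
      simp

theorem convertAltLoop_spec : ∀ (m : Nat) (res : List Char),
    convertAltLoop (m : Int) res = excelN m ++ res := by
  intro m
  induction m using Nat.strong_induction_on with
  | _ m ih =>
    intro res
    by_cases hm : m = 0
    · subst hm; rw [convertAltLoop]; simp [excelN_zero]
    · have hpos : (0:Int) < (m : Int) := by exact_mod_cast Nat.pos_of_ne_zero hm
      have hcast : ((m : Int) - 1) = ((m - 1 : Nat) : Int) := by omega
      have hdiv : PySem.Int.floordiv ((m : Int) - 1) 26 = (((m - 1) / 26 : Nat) : Int) := by
        rw [hcast]; exact_mod_cast PySem.Int.floordiv_natCast (m - 1) 26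
      have hmod : PySem.Int.mod ((m : Int) - 1) 26 = (((m - 1) % 26 : Nat) : Int) := by
        rw [hcast]; exact_mod_cast PySem.Int.mod_natCast (m - 1) 26
      have htoNat : ((65 : Int) + (((m - 1) % 26 : Nat) : Int)).toNat = 65 + (m - 1) % 26 := by
        omega
      have hlt : (m - 1) / 26 < m := by
        have := Nat.div_le_self (m - 1) 26; omega
      rw [convertAltLoop]
      simp only [hpos, dif_pos, hdiv, hmod, htoNat, ih _ hlt, excelN_pos hm]
      simp

theorem convertMap_get (i : Int) (h0 : 0 ≤ i) (h26 : i < 26) :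
    convertMap.get? i = some (Char.ofNat (65 + i.toNat)) := by
  have hfin : ∀ d : Fin 26, convertMap.get? ((d : Nat) : Int) = some (Char.ofNat (65 + (d : Nat))) := by
    decide
  have := hfin ⟨i.toNat, by omega⟩
  simpa [Int.toNat_of_nonneg h0] using this

theorem mem_digitsN : ∀ (k m : Nat), m < 26 ^ k → ∀ d ∈ digitsN m,
    ∃ i < k, m / 26 ^ i ≠ 0 ∧ d = m / 26 ^ i % 26 := by
  intro k
  induction k with
  | zero => intro m hm d hd; interval_cases m; rw [digitsN_zero] at hd; simp at hd
  | succ k ih =>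
    intro m hm d hd
    by_cases h0 : m = 0
    · subst h0; rw [digitsN_zero] at hd; simp at hd
    · rw [digitsN_pos h0] at hd
      rcases List.mem_cons.mp hd with h | h
      · exact ⟨0, by omega, by simpa using h0, by simpa using h⟩
      · have hlt : m / 26 < 26 ^ k := by
          rw [Nat.div_lt_iff_lt_mul (by omega)]
          calc m < 26 ^ (k + 1) := hm
            _ = 26 ^ k * 26 := by ring
        obtain ⟨i, hik, hne, hd'⟩ := ih (m / 26) hlt d h
        have he : m / 26 ^ (i + 1) = m / 26 / 26 ^ i := by
          rw [Nat.div_div_eq_div_mul, pow_succ']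
        exact ⟨i + 1, by omega, by rw [he]; exact hne, by rw [he]; exact hd'⟩

theorem excelN_of_digits : ∀ m : Nat, (∀ d ∈ digitsN m, d ≠ 0) →
    excelN m = (digitsN m).reverse.map (fun d => Char.ofNat (64 + d)) := by
  intro m
  induction m using Nat.strong_induction_on with
  | _ m ih =>
    intro hnz
    by_cases h0 : m = 0
    · subst h0; simp [excelN_zero, digitsN_zero]
    · have hd0 : m % 26 ≠ 0 := by
        apply hnz; rw [digitsN_pos h0]; exact List.mem_cons_self
      have hmod : (m - 1) % 26 = m % 26 - 1 := by omega
      have hdiv : (m - 1) / 26 = m / 26 := by omega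
      have hchar : 65 + (m % 26 - 1) = 64 + m % 26 := by omega
      have hrec : excelN (m / 26) = (digitsN (m / 26)).reverse.map (fun d => Char.ofNat (64 + d)) := by
        apply ih (m / 26) (Nat.div_lt_self (Nat.pos_of_ne_zero h0) (by omega))
        intro d hd; apply hnz; rw [digitsN_pos h0]; exact List.mem_cons_of_mem _ hd
      rw [excelN_pos h0, hmod, hdiv, hchar, hrec, digitsN_pos h0]
      simp

-- every digit of (num / 26) is nonzero and < 26, from Pre_ (within Dom)
theorem tail_digits_bounds (m : Nat) (hm : m ≤ 2147483648)
    (hpre : ∀ k ∈ Finset.Icc 1 7, (m : Int) / (26:Int) ^ k = 0 ∨ (m : Int) / (26:Int) ^ k % 26 ≠ 0) :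
    ∀ d ∈ digitsN (m / 26), d ≠ 0 ∧ d < 26 := by
  intro d hd
  have hbound : m / 26 < 26 ^ 7 := by
    have : (26:Nat) ^ 7 = 8031810176 := by norm_num
    have := Nat.div_le_self m 26
    omega
  obtain ⟨i, hi7, hne, hdeq⟩ := mem_digitsN 7 (m / 26) hbound d hd
  have hdm : (m / 26) / 26 ^ i = m / 26 ^ (i + 1) := by
    rw [pow_succ', Nat.div_div_eq_div_mul]
  rw [hdm] at hne hdeq
  have hk := hpre (i + 1) (Finset.mem_Icc.mpr ⟨by omega, by omega⟩)
  have hcast1 : ((m : Int) / (26:Int) ^ (i + 1)) = ((m / 26 ^ (i + 1) : Nat) : Int) := by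
    norm_cast
  have hcast2 : ((m / 26 ^ (i + 1) : Nat) : Int) % 26 = ((m / 26 ^ (i + 1) % 26 : Nat) : Int) := by
    norm_cast
  rcases hk with h | h
  · exfalso; apply hne; rw [hcast1] at h; exact_mod_cast h
  · constructor
    · intro hd0
      apply h
      rw [hcast1, hcast2, ← hdeq, hd0]; rfl
    · rw [hdeq]; exact Nat.mod_lt _ (by omega)

-- ===== VERDICT (by name: the statement is the Claim_ definition above) =====
theorem convert_spec : Claim_equal_convert := by
  unfold Claim_equal_convert Spec_convert
  intro num hdom hpre
  obtain ⟨hnn, hdig⟩ := hpre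
  have hm : num = ((num.toNat : Nat) : Int) := by omega
  set m : Nat := num.toNat with hmdef
  have hmb : m ≤ 2147483648 := by
    unfold Dom_convert pvDomInt at hdom
    have := of_decide_eq_true hdom
    omega
  by_cases h0 : m = 0
  · -- num = 0: A returns _map[0] = 'A', B returns excelN 1 = ['A']
    have hz : num = 0 := by omega
    subst hz
    rw [convert, if_pos rfl, convert_alt]
    have h1 : (0:Int) + 1 = ((1 : Nat) : Int) := by norm_num
    rw [h1, convertAltLoop_spec 1 []]
    rw [excelN_pos (by norm_num)]
    norm_num [excelN_zero]
    apply congrArg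
    decide
  · have hne : num ≠ 0 := by omega
    have hdigN := tail_digits_bounds m hmb (by rw [← hm]; exact hdig)
    have hloop : convertLoopA (num.toNat + 1) num [] = (digitsN m).map (fun (d : Nat) => (d : Int)) := by
      rw [hm]
      exact convertLoopA_spec (m + 1) m [] (by omega)
    rw [convert, if_neg hne]
    simp only [hloop, digitsN_pos h0]
    set ds := digitsN (m / 26) with hds
    set d0 := m % 26 with hd0
    have hd0lt : d0 < 26 := Nat.mod_lt _ (by omega)
    have hrev : (List.map (fun (d : Nat) => (d : Int)) (d0 :: ds)).reverse
        = (ds.reverse.map (fun (d : Nat) => (d : Int))) ++ [((d0 : Nat) : Int)] := by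
      simp [List.map_reverse]
    rw [hrev]
    rw [PySem.List.slice_zero_start, PySem.List.slice_to_neg_one,
      List.dropLast_concat, PySem.List.pyGet?_neg_one_append_singleton]
    have hlast : (convertMap.get? ((d0 : Nat) : Int)).getD '?' = Char.ofNat (65 + d0) := by
      rw [convertMap_get _ (by omega) (by exact_mod_cast hd0lt)]
      simp
    have hchars : ((ds.reverse.map (fun (d : Nat) => (d : Int))).map (fun r => r - 1)).map
          (fun x => (convertMap.get? x).getD '?')
        = ds.reverse.map (fun d => Char.ofNat (64 + d)) := by
      rw [List.map_map, List.map_map]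
      apply List.map_congr_left
      intro d hd
      have hdb := hdigN d (List.mem_reverse.mp hd)
      show (convertMap.get? ((d : Int) - 1)).getD '?' = Char.ofNat (64 + d)
      have h1 : ((d : Int) - 1) = (((d - 1 : Nat)) : Int) := by omega
      rw [h1, convertMap_get _ (by omega) (by exact_mod_cast (by omega : d - 1 < 26))]
      simp only [Option.getD_some]
      congr 1
      omega
    -- B side
    rw [convert_alt]
    have hcast : num + 1 = ((m + 1 : Nat) : Int) := by omega
    rw [hcast, convertAltLoop_spec (m + 1) []]
    rw [excelN_pos (by omega : m + 1 ≠ 0)]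
    have e1 : (m + 1 - 1) / 26 = m / 26 := by omega
    have e2 : 65 + (m + 1 - 1) % 26 = 65 + d0 := by omega
    rw [e1, e2, excelN_of_digits (m / 26) (fun d hd => (hdigN d hd).1), ← hds]
    rw [List.map_append, hchars]
    simp [hlast]

theorem convert_raises : Claim_raises_convert := by
  unfold Claim_raises_convert
  constructor
  · rintro num _ ⟨hnn, k, hk, hne, hz⟩ ⟨_, hall⟩
    rcases hall k hk with h | h
    · exact hne h
    · exact h hz
  · refine ⟨by decide, by decide, ?_⟩
    show convert_alt 676 = "ZA"
    rw [convert_alt]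
    have h1 : (676:Int) + 1 = ((677 : Nat) : Int) := by norm_num
    have h3 : excelN 26 = [Char.ofNat 90] := by
      rw [excelN_pos (by norm_num)]
      norm_num [excelN_zero]
    have h2 : excelN 677 = ['Z', 'A'] := by
      rw [excelN_pos (by norm_num)]
      norm_num [h3]
    rw [h1, convertAltLoop_spec 677 [], h2]
    decide

-- self-check corollary of `convert_raises`: the crash-fix region lies outside Pre_convert
theorem convert_raises_ok (num : Int) (hd : Dom_convert num) (h : Raises_convert num) :
    ¬ Pre_convert num :=
  convert_raises.1 num hd h
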